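-- pv_equiv track=rewrite | github.com/heyhenry/Aeoncell | pages/stats_page.py | split_data_by_week
-- ===== SOURCE A (Python) =====
-- def split_data_by_week(data_dict):
--     dates = []
--     values = []
--     counter = 0
--     dates_temp = []
--     values_temp = []
--     for key, val in data_dict.items():
--         dates_temp.append(key)
--         values_temp.append(val)
--         counter += 1
--
--         if counter == 7:
--             dates.append(dates_temp)
--             values.append(values_temp)
--             counter = 0
--             dates_temp = []
--             values_temp = []
--
--     if dates_temp:
--         dates.append(dates_temp)
--         values.append(values_temp)
--
--     return (dates, values)
-- ===== SOURCE B (Python) =====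
-- def split_data_by_week(data_dict):
--     def chunk(items):
--         if not items:
--             return ([], [])
--         head = items[:7]
--         d, v = chunk(items[7:])
--         return ([[k for k, _ in head]] + d, [[x for _, x in head]] + v)
--     return chunk(list(data_dict.items()))
-- ===== Notes on version B (the rewrite author's own statement) =====
-- stated objective: simpler
-- what changed: Replaced the counter/temp-buffer loop with a trailing flush by a recursive take-7/drop-7 chunker over the materialized item list.
import Mathlib
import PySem

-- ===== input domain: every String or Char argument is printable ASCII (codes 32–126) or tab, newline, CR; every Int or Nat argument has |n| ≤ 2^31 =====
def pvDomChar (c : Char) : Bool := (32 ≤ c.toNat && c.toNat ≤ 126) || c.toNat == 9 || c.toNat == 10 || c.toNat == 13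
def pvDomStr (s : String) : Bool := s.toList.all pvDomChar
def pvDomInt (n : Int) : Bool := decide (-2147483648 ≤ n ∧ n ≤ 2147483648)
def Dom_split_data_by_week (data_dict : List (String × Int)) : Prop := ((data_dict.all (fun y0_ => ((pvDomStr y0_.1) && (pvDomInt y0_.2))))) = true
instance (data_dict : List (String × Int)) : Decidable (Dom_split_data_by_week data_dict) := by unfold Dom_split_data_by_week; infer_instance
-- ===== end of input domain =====

-- B replaces A's counter/temp-buffer loop with a recursive take-7/drop-7 chunker (simpler decomposition, same O(n) cost).
-- ===== PORT A =====
-- the for-loop of A, state = (dates, values, counter, dates_temp, values_temp); the trailing 'if dates_temp:' flush is the base case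
def pvGoA (l : List (String × Int)) (dates : List (List String)) (values : List (List Int))
    (counter : Int) (dates_temp : List String) (values_temp : List Int) :
    List (List String) × List (List Int) :=
  match l with
  | [] => if dates_temp ≠ [] then (dates ++ [dates_temp], values ++ [values_temp]) else (dates, values)
  | (key, val) :: rest =>
    let dates_temp' := dates_temp ++ [key]
    let values_temp' := values_temp ++ [val]
    let counter' := counter + 1
    if counter' = 7 then
      pvGoA rest (dates ++ [dates_temp']) (values ++ [values_temp']) 0 [] []
    else
      pvGoA rest dates values counter' dates_temp' values_temp'

def split_data_by_week (data_dict : List (String × Int)) : List (List String) × List (List Int) :=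
  pvGoA data_dict [] [] 0 [] []

-- ===== PORT B =====
-- chunk: items[:7] / items[7:] recursion (nonnegative slices = take/drop)
def pvChunkB : List (String × Int) → List (List String) × List (List Int)
  | [] => ([], [])
  | x :: xs =>
    let head := (x :: xs).take 7
    let (d, v) := pvChunkB ((x :: xs).drop 7)
    ((head.map Prod.fst) :: d, (head.map Prod.snd) :: v)
termination_by l => l.length
decreasing_by simp [List.length_drop]

def split_data_by_week_alt (data_dict : List (String × Int)) : List (List String) × List (List Int) :=
  pvChunkB data_dict

-- ===== PRECONDITION & SPEC =====
def Spec_split_data_by_week (data_dict : List (String × Int)) (out : List (List String) × List (List Int)) : Prop := out = split_data_by_week_alt data_dict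
instance (data_dict : List (String × Int)) (out : List (List String) × List (List Int)) : Decidable (Spec_split_data_by_week data_dict out) := by unfold Spec_split_data_by_week; infer_instance

-- ===== CLAIM (what is proved, stated in full; the proofs are below) =====
def Claim_equal_split_data_by_week : Prop := ∀ (data_dict : List (String × Int)), Dom_split_data_by_week data_dict → Spec_split_data_by_week data_dict (split_data_by_week data_dict)

-- ===== LEMMAS AND PROOFS =====

lemma pvChunkB_cons (x : String × Int) (xs : List (String × Int)) :
    pvChunkB (x :: xs) =
      (((x :: xs).take 7).map Prod.fst :: (pvChunkB ((x :: xs).drop 7)).1,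
       ((x :: xs).take 7).map Prod.snd :: (pvChunkB ((x :: xs).drop 7)).2) := by
  rw [pvChunkB]

lemma pvGoA_eq (l : List (String × Int)) (dates : List (List String)) (values : List (List Int))
    (dt : List String) (vt : List Int) (hlen : dt.length = vt.length) (hlt : dt.length < 7) :
    pvGoA l dates values (dt.length : Int) dt vt =
      (dates ++ (pvChunkB (dt.zip vt ++ l)).1, values ++ (pvChunkB (dt.zip vt ++ l)).2) := by
  induction l generalizing dates values dt vt with
  | nil =>
    simp only [pvGoA, List.append_nil]
    by_cases h : dt = []
    · subst h
      have : vt = [] := by simpa using hlen.symm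
      subst this
      simp [pvChunkB]
    · obtain ⟨a, as, rfl⟩ := List.exists_cons_of_ne_nil h
      obtain ⟨b, bs, rfl⟩ : ∃ b bs, vt = b :: bs := by
        cases vt with
        | nil => simp at hlen
        | cons b bs => exact ⟨b, bs, rfl⟩
      simp only [ne_eq, reduceCtorEq, not_false_eq_true, if_pos, List.zip_cons_cons]
      rw [pvChunkB_cons]
      have hz : ((a, b) :: as.zip bs).length ≤ 7 := by
        simp only [List.length_cons, List.length_zip]
        simp only [List.length_cons] at hlt
        omega
      rw [List.take_of_length_le hz, List.drop_eq_nil_of_le hz]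
      have hlen' : as.length = bs.length := by simpa using hlen
      simp [pvChunkB, List.map_fst_zip, List.map_snd_zip, hlen'.le, hlen'.ge]
  | cons p rest ih =>
    obtain ⟨k, v⟩ := p
    simp only [pvGoA]
    by_cases h7 : (dt.length : Int) + 1 = 7
    · have h6 : dt.length = 6 := by omega
      rw [if_pos h7]
      have := ih (dates ++ [dt ++ [k]]) (values ++ [vt ++ [v]]) [] [] rfl (by norm_num)
      simp only [List.length_nil, Nat.cast_zero, List.zip_nil_left, List.nil_append] at this
      rw [this]
      have hv6 : vt.length = 6 := by omega
      have hlen7 : (dt.zip vt ++ (k, v) :: rest) =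
          (dt.zip vt ++ [(k, v)]) ++ rest := by simp
      rw [hlen7]
      have hzl : (dt.zip vt ++ [(k, v)]).length = 7 := by
        simp [List.length_zip, h6, hv6]
      obtain ⟨q, qs, hq⟩ : ∃ q qs, dt.zip vt ++ [(k, v)] = q :: qs := by
        cases hc : dt.zip vt ++ [(k, v)] with
        | nil => simp at hc
        | cons q qs => exact ⟨q, qs, rfl⟩
      have hzq : (q :: qs).length = 7 := hq ▸ hzl
      rw [hq, List.cons_append, pvChunkB_cons, ← List.cons_append, ← hq]
      rw [List.take_append_of_le_length (by omega), List.take_of_length_le (by omega),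
          List.drop_append_of_le_length (by omega), List.drop_eq_nil_of_le (by omega)]
      have hmf : List.map Prod.fst (dt.zip vt) = dt :=
        List.map_fst_zip (by omega)
      have hms : List.map Prod.snd (dt.zip vt) = vt :=
        List.map_snd_zip (by omega)
      simp [hmf, hms, List.append_assoc]
    · rw [if_neg h7]
      have hlt' : (dt ++ [k]).length < 7 := by
        simp only [List.length_append, List.length_cons, List.length_nil]
        omega
      have hlen' : (dt ++ [k]).length = (vt ++ [v]).length := by
        simp [hlen]
      have hcast : (dt.length : Int) + 1 = ((dt ++ [k]).length : Int) := by
        simp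
      rw [hcast]
      rw [ih dates values (dt ++ [k]) (vt ++ [v]) hlen' hlt']
      rw [List.zip_append (by simpa using hlen)]
      simp

-- ===== VERDICT (by name: the statement is the Claim_ definition above) =====
theorem split_data_by_week_spec : Claim_equal_split_data_by_week := by
  intro data_dict _
  unfold Spec_split_data_by_week split_data_by_week split_data_by_week_alt
  have := pvGoA_eq data_dict [] [] [] [] rfl (by norm_num)
  simpa using this
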